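-- pv_equiv track=rewrite | github.com/leila100/coding-exercises | codeSignal/theCore/mirrorLake/mostFrequentDigitSum.py | mostFrequentDigitSum
-- ===== SOURCE A (Python) =====
-- def mostFrequentDigitSum(n):
--     strN = str(n)
--     result = sum([int(digit) for digit in strN])
--     results = []
--     results.append(result)
--     maxNum = result
--     count = 1
--     step = n
--     while step != 0:
--         step -= result
--         result = sum([int(digit) for digit in str(step)])
--         results.append(result)
--         currentCount = results.count(result)
--         if currentCount > count:
--             count = currentCount
--             maxNum = result
--         elif currentCount == count:
--             maxNum = max(maxNum, result)
--     return maxNum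
-- ===== SOURCE B (Python) =====
-- def mostFrequentDigitSum(n):
--     # Phase 1: build the digit-sum sequence (same process, staged separately).
--     def digitsum(x):
--         return sum(int(d) for d in str(x))
--     seq = []
--     step = n
--     d = digitsum(n)
--     seq.append(d)
--     while step != 0:
--         step -= d
--         d = digitsum(step)
--         seq.append(d)
--     # Phase 2: sort-then-scan. In the ascending sorted sequence equal values are
--     # contiguous, so one linear run scan finds the longest run; '>=' makes the
--     # LAST (= largest) value among maximal-length runs win, which is exactly the
--     # 'largest value at maximal frequency' tie-break.
--     prev = None
--     run = 0
--     best_len = 0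
--     best_val = 0
--     for v in sorted(seq):
--         run = run + 1 if v == prev else 1
--         prev = v
--         if run >= best_len:
--             best_len = run
--             best_val = v
--     return best_val
-- ===== Notes on version B (the rewrite author's own statement) =====
-- stated objective: faster
-- what changed: A interleaves generation with quadratic tallying: every iteration rescans the growing results list with list.count and updates a running (count, maxNum) tie-break; B stages the work differently: it first builds the digit-sum sequence, then SORTS it and finds the answer by one linear run scan over the sorted list (equal values are contiguous, '>=' keeps the largest value among maximal-length runs), with no counting table and no per-iteration rescan. Pre_ excludes negative n, on which A raises ValueError.
import Mathlib
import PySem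

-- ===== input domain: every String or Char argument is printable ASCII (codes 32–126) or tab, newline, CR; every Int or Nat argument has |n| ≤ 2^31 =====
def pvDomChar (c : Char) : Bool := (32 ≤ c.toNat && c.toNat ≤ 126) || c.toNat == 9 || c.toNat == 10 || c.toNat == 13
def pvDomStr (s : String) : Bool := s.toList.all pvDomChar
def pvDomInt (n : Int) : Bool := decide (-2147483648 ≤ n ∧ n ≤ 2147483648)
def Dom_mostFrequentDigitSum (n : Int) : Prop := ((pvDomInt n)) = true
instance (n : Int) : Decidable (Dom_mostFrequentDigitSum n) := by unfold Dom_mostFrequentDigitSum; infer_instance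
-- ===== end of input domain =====

-- B replaces A's per-iteration results.count rescans and running (count, maxNum) tie-break
-- by generating the sequence first, sorting it, and finding the answer with one linear run
-- scan over the sorted list (objective: faster).

-- ===== PORT A =====
-- sum([int(digit) for digit in str(x)]); int(digit) is exact via PySem.Int.ofChars? for digit
-- characters (on a minus sign, i.e. negative x, Python raises ValueError — those inputs are outside Pre_).
def digitsum (x : Int) : Int :=
  ((PySem.Int.toChars x).map (fun d => (PySem.Int.ofChars? [d]).getD 0)).sum

-- A's while loop; fuel n.toNat + 1 bounds the iteration count (step decreases by ≥ 1 per pass).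
def aLoop (fuel : Nat) (step result : Int) (results : List Int) (count maxNum : Int) : Int :=
  match fuel with
  | 0 => maxNum
  | fuel + 1 =>
    if step = 0 then maxNum
    else
      let step' := step - result
      let result' := digitsum step'
      let results' := results ++ [result']
      let currentCount : Int := (results'.count result' : Int)
      if currentCount > count then aLoop fuel step' result' results' currentCount result'
      else if currentCount = count then aLoop fuel step' result' results' count (max maxNum result')
      else aLoop fuel step' result' results' count maxNum

def mostFrequentDigitSum (n : Int) : Int :=
  let result := digitsum n
  aLoop (n.toNat + 1) n result [result] 1 result

-- ===== PORT B =====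
-- Phase 1 of Source B: the generation while loop, collecting the digit-sum sequence
-- (same fuel bound as A's loop; the Python loop terminates since step decreases).
def bGenLoop (fuel : Nat) (step d : Int) (seq : List Int) : List Int :=
  match fuel with
  | 0 => seq
  | fuel + 1 =>
    if step = 0 then seq
    else
      let step' := step - d
      let d' := digitsum step'
      bGenLoop fuel step' d' (seq ++ [d'])

-- Phase 2 of Source B: one fold over sorted(seq); state = (prev, run, best_len, best_val).
def bScanStep (st : Option Int × Int × Int × Int) (v : Int) : Option Int × Int × Int × Int :=
  let run := if some v = st.1 then st.2.1 + 1 else 1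
  if run ≥ st.2.2.1 then (some v, run, run, v) else (some v, run, st.2.2.1, st.2.2.2)

def mostFrequentDigitSum_alt (n : Int) : Int :=
  let seq := bGenLoop (n.toNat + 1) n (digitsum n) [digitsum n]
  ((PySem.List.sorted seq (fun v => v)).foldl bScanStep
    ((none : Option Int), (0 : Int), (0 : Int), (0 : Int))).2.2.2

-- ===== PRECONDITION & SPEC =====
-- Pre_ excludes negative n, on which Python A raises ValueError (int('-') inside the digit-sum comprehension).
def Pre_mostFrequentDigitSum (n : Int) : Prop := 0 ≤ n
instance (n : Int) : Decidable (Pre_mostFrequentDigitSum n) := by unfold Pre_mostFrequentDigitSum; infer_instance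
def pvWitness_mostFrequentDigitSum : Int := 239

def Spec_mostFrequentDigitSum (n : Int) (out : Int) : Prop := out = mostFrequentDigitSum_alt n
instance (n : Int) (out : Int) : Decidable (Spec_mostFrequentDigitSum n out) := by unfold Spec_mostFrequentDigitSum; infer_instance

-- ===== CLAIM (what is proved, stated in full; the proofs are below) =====
def Claim_equal_mostFrequentDigitSum : Prop := ∀ (n : Int), Dom_mostFrequentDigitSum n → Pre_mostFrequentDigitSum n → Spec_mostFrequentDigitSum n (mostFrequentDigitSum n)

-- ===== LEMMAS AND PROOFS =====

-- the digit-sum sequence both loops walk through (proof-side helper)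
def genSeq (fuel : Nat) (step : Int) : List Int :=
  match fuel with
  | 0 => []
  | fuel + 1 =>
    if step = 0 then []
    else
      let step' := step - digitsum step
      digitsum step' :: genSeq fuel step'

-- "c is the maximal frequency in P and mx the largest value achieving it"
def IsBest (P : List Int) (c mx : Int) : Prop :=
  (∀ v ∈ P, (P.count v : Int) ≤ c) ∧ mx ∈ P ∧ (P.count mx : Int) = c ∧
    (∀ v ∈ P, (P.count v : Int) = c → v ≤ mx)

lemma count_append_singleton (P : List Int) (x v : Int) :
    (P ++ [x]).count v = P.count v + if v = x then 1 else 0 := by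
  by_cases h : v = x
  · subst h; simp [List.count_append]
  · simp [List.count_append, h, List.count_cons, List.count_nil]; omega

lemma bGenLoop_eq (fuel : Nat) : ∀ (step : Int) (seq : List Int),
    bGenLoop fuel step (digitsum step) seq = seq ++ genSeq fuel step := by
  induction fuel with
  | zero => intro step seq; simp [bGenLoop, genSeq]
  | succ fuel ih =>
    intro step seq
    by_cases hs : step = 0
    · simp [bGenLoop, genSeq, hs]
    · rw [bGenLoop, genSeq]
      simp only [if_neg hs]
      rw [ih]
      simp

-- one iteration of A's running (count, maxNum) update preserves IsBest
lemma isBest_step (P : List Int) (c mx x : Int) (h : IsBest P c mx) :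
    IsBest (P ++ [x]) (if ((P ++ [x]).count x : Int) > c then ((P ++ [x]).count x : Int) else c)
      (if ((P ++ [x]).count x : Int) > c then x
       else if ((P ++ [x]).count x : Int) = c then max mx x else mx) := by
  obtain ⟨hub, hmem, hcnt, hmax⟩ := h
  have hx : (P ++ [x]).count x = P.count x + 1 := by
    rw [count_append_singleton]; simp
  have hne : ∀ v, v ≠ x → (P ++ [x]).count v = P.count v := by
    intro v hv; rw [count_append_singleton]; simp [hv]
  have hmemx : x ∈ P ++ [x] := by simp
  by_cases h1 : ((P ++ [x]).count x : Int) > c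
  · rw [if_pos h1, if_pos h1]
    refine ⟨?_, hmemx, rfl, ?_⟩
    · intro v hv
      by_cases hvx : v = x
      · subst hvx; rfl
      · rw [hne v hvx]
        have := List.mem_append.mp hv
        rcases this with hvP | hvx'
        · exact le_trans (hub v hvP) (le_of_lt h1)
        · simp at hvx'; exact absurd hvx' hvx
    · intro v hv hcv
      by_cases hvx : v = x
      · exact le_of_eq hvx
      · exfalso
        rw [hne v hvx] at hcv
        have hvP : v ∈ P := by
          rcases List.mem_append.mp hv with h' | h'
          · exact h'
          · simp at h'; exact absurd h' hvx
        have := hub v hvP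
        omega
  · rw [if_neg h1, if_neg h1]
    have hub' : ∀ v ∈ P ++ [x], ((P ++ [x]).count v : Int) ≤ c := by
      intro v hv
      by_cases hvx : v = x
      · subst hvx; omega
      · rw [hne v hvx]
        have hvP : v ∈ P := by
          rcases List.mem_append.mp hv with h' | h'
          · exact h'
          · simp at h'; exact absurd h' hvx
        exact hub v hvP
    by_cases h2 : ((P ++ [x]).count x : Int) = c
    · rw [if_pos h2]
      refine ⟨hub', ?_, ?_, ?_⟩
      · rcases max_choice mx x with hm | hm <;> rw [hm]
        · exact List.mem_append_left _ hmem
        · exact hmemx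
      · rcases max_choice mx x with hm | hm <;> rw [hm]
        · by_cases hmx : mx = x
          · rw [hmx]; exact h2
          · rw [hne mx hmx]; exact hcnt
        · exact h2
      · intro v hv hcv
        by_cases hvx : v = x
        · subst hvx; exact le_max_right _ _
        · rw [hne v hvx] at hcv
          have hvP : v ∈ P := by
            rcases List.mem_append.mp hv with h' | h'
            · exact h'
            · simp at h'; exact absurd h' hvx
          exact le_trans (hmax v hvP hcv) (le_max_left _ _)
    · rw [if_neg h2]
      refine ⟨hub', List.mem_append_left _ hmem, ?_, ?_⟩
      · have hmx : mx ≠ x := by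
          intro he
          rw [he] at hcnt
          have : ((P ++ [x]).count x : Int) = c + 1 := by rw [hx]; push_cast; omega
          omega
        rw [hne mx hmx]; exact hcnt
      · intro v hv hcv
        by_cases hvx : v = x
        · subst hvx; exact absurd hcv h2
        · rw [hne v hvx] at hcv
          have hvP : v ∈ P := by
            rcases List.mem_append.mp hv with h' | h'
            · exact h'
            · simp at h'; exact absurd h' hvx
          exact hmax v hvP hcv

-- A's whole loop lands on an IsBest maximum of the generated sequence
lemma aLoop_best (fuel : Nat) : ∀ (step : Int) (P : List Int) (c mx : Int), IsBest P c mx →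
    ∃ c', IsBest (P ++ genSeq fuel step) c' (aLoop fuel step (digitsum step) P c mx) := by
  induction fuel with
  | zero =>
    intro step P c mx h
    exact ⟨c, by simpa [genSeq, aLoop] using h⟩
  | succ fuel ih =>
    intro step P c mx h
    by_cases hs : step = 0
    · exact ⟨c, by simpa [genSeq, aLoop, hs] using h⟩
    · have hgen : genSeq (fuel + 1) step
          = digitsum (step - digitsum step) :: genSeq fuel (step - digitsum step) := by
        rw [genSeq]; simp [hs]
      set x := digitsum (step - digitsum step) with hxdef
      have hstep := isBest_step P c mx x h
      have hassoc : P ++ genSeq (fuel + 1) step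
          = (P ++ [x]) ++ genSeq fuel (step - digitsum step) := by
        rw [hgen]; simp
      rw [hassoc]
      have hunfold : aLoop (fuel + 1) step (digitsum step) P c mx
          = (if ((P ++ [x]).count x : Int) > c then
               aLoop fuel (step - digitsum step) x (P ++ [x]) ((P ++ [x]).count x : Int) x
             else if ((P ++ [x]).count x : Int) = c then
               aLoop fuel (step - digitsum step) x (P ++ [x]) c (max mx x)
             else aLoop fuel (step - digitsum step) x (P ++ [x]) c mx) := by
        rw [aLoop]; simp only [if_neg hs]; rw [← hxdef]
      rw [hunfold]
      by_cases h1 : ((P ++ [x]).count x : Int) > c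
      · rw [if_pos h1]; rw [if_pos h1, if_pos h1] at hstep
        exact ih (step - digitsum step) (P ++ [x]) _ x hstep
      · rw [if_neg h1]; rw [if_neg h1, if_neg h1] at hstep
        by_cases h2 : ((P ++ [x]).count x : Int) = c
        · rw [if_pos h2]; rw [if_pos h2] at hstep
          exact ih (step - digitsum step) (P ++ [x]) c (max mx x) hstep
        · rw [if_neg h2]; rw [if_neg h2] at hstep
          exact ih (step - digitsum step) (P ++ [x]) c mx hstep

-- the best value is unique: two IsBest descriptions of the same list agree on it
lemma isBest_unique (P : List Int) (c1 m1 c2 m2 : Int)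
    (h1 : IsBest P c1 m1) (h2 : IsBest P c2 m2) : m1 = m2 := by
  obtain ⟨ub1, mem1, cnt1, max1⟩ := h1
  obtain ⟨ub2, mem2, cnt2, max2⟩ := h2
  have hc : c1 = c2 := by
    have := ub1 m2 mem2
    have := ub2 m1 mem1
    omega
  have h12 : m1 ≤ m2 := max2 m1 mem1 (by omega)
  have h21 : m2 ≤ m1 := max1 m2 mem2 (by omega)
  omega

-- IsBest only mentions counts and membership, so it transfers along permutations
lemma isBest_perm (P Q : List Int) (c mx : Int) (hp : P.Perm Q) (h : IsBest P c mx) :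
    IsBest Q c mx := by
  obtain ⟨ub, mem, cnt, hmax⟩ := h
  refine ⟨?_, hp.mem_iff.mp mem, ?_, ?_⟩
  · intro v hv; rw [← hp.count_eq]; exact ub v (hp.mem_iff.mpr hv)
  · rw [← hp.count_eq]; exact cnt
  · intro v hv hc; rw [← hp.count_eq] at hc; exact hmax v (hp.mem_iff.mpr hv) hc

-- B's run scan over an ascending list: the invariant carried by the fold
lemma bScan_inv (s : List Int) :
    s ≠ [] → s.Pairwise (· ≤ ·) →
    ∃ l bl bv, s.foldl bScanStep ((none : Option Int), (0 : Int), (0 : Int), (0 : Int))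
        = (some l, (s.count l : Int), bl, bv)
      ∧ l ∈ s ∧ (∀ x ∈ s, x ≤ l) ∧ IsBest s bl bv := by
  induction s using List.reverseRecOn with
  | nil => intro h; exact absurd rfl h
  | append_singleton s v ih =>
    intro _ hpw
    have hpw' : s.Pairwise (· ≤ ·) := hpw.sublist (List.sublist_append_left s [v])
    have hle : ∀ x ∈ s, x ≤ v := by
      intro x hx
      exact (List.pairwise_append.mp hpw).2.2 x hx v (by simp)
    have hmaxall : ∀ x ∈ s ++ [v], x ≤ v := by
      intro x hx
      rcases List.mem_append.mp hx with h' | h'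
      · exact hle x h'
      · simp at h'; omega
    have hneq : ∀ w, w ≠ v → (s ++ [v]).count w = s.count w := by
      intro w hw; rw [count_append_singleton]; simp [hw]
    rcases eq_or_ne s [] with hs | hs
    · subst hs
      refine ⟨v, 1, v, by simp [bScanStep], by simp, by simp, by simp, by simp, by simp, ?_⟩
      intro w hw _; simp at hw; omega
    · obtain ⟨l, bl, bv, hfold, hlmem, hlmax, hbest⟩ := ih hs hpw'
      obtain ⟨ub, mem, cnt, hmax⟩ := hbest
      have hlv : l ≤ v := hle l hlmem
      -- run' = count of v in s ++ [v]
      have hrun : (if some v = some l then ((s.count l : Int)) + 1 else 1)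
          = ((s ++ [v]).count v : Int) := by
        by_cases hvl : v = l
        · subst hvl; rw [if_pos rfl, count_append_singleton]; push_cast; simp
        · rw [if_neg (by simpa using hvl)]
          have hvns : v ∉ s := fun hvs => hvl (le_antisymm (hlmax v hvs) hlv)
          rw [count_append_singleton]
          simp [List.count_eq_zero_of_not_mem hvns]
      have hfold' : (s ++ [v]).foldl bScanStep ((none : Option Int), (0 : Int), (0 : Int), (0 : Int))
          = (if ((s ++ [v]).count v : Int) ≥ bl
              then (some v, ((s ++ [v]).count v : Int), ((s ++ [v]).count v : Int), v)
              else (some v, ((s ++ [v]).count v : Int), bl, bv)) := by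
        rw [List.foldl_append, hfold]
        show (if (if some v = some l then ((s.count l : Int)) + 1 else 1) ≥ bl then _ else _) = _
        rw [hrun]
      by_cases hb : ((s ++ [v]).count v : Int) ≥ bl
      · refine ⟨v, ((s ++ [v]).count v : Int), v, ?_, by simp, hmaxall, ?_, by simp, rfl, ?_⟩
        · rw [hfold', if_pos hb]
        · intro w hw
          by_cases hwv : w = v
          · subst hwv; rfl
          · have hws : w ∈ s := by
              rcases List.mem_append.mp hw with h' | h'
              · exact h'
              · simp at h'; exact absurd h' hwv
            rw [hneq w hwv]
            exact le_trans (ub w hws) hb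
        · intro w hw _; exact hmaxall w hw
      · replace hb := lt_of_not_ge hb
        have hbvv : bv ≠ v := by
          intro he
          have h1 : (s ++ [v]).count v = s.count v + 1 := by
            rw [count_append_singleton]; simp
          rw [he] at cnt
          rw [h1] at hb
          push_cast at hb cnt
          omega
        refine ⟨v, bl, bv, ?_, by simp, hmaxall, ?_, List.mem_append_left _ mem, ?_, ?_⟩
        · rw [hfold', if_neg (by omega)]
        · intro w hw
          by_cases hwv : w = v
          · subst hwv; omega
          · have hws : w ∈ s := by
              rcases List.mem_append.mp hw with h' | h'
              · exact h'
              · simp at h'; exact absurd h' hwv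
            rw [hneq w hwv]
            exact ub w hws
        · rw [hneq bv hbvv]; exact cnt
        · intro w hw hcw
          by_cases hwv : w = v
          · subst hwv; omega
          · have hws : w ∈ s := by
              rcases List.mem_append.mp hw with h' | h'
              · exact h'
              · simp at h'; exact absurd h' hwv
            rw [hneq w hwv] at hcw
            exact hmax w hws hcw

-- ===== VERDICT (by name: the statement is the Claim_ definition above) =====
theorem mostFrequentDigitSum_spec : Claim_equal_mostFrequentDigitSum := by
  intro n _ _
  unfold Spec_mostFrequentDigitSum
  simp only [mostFrequentDigitSum, mostFrequentDigitSum_alt]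
  rw [bGenLoop_eq]
  set seq := [digitsum n] ++ genSeq (n.toNat + 1) n with hseq
  have base : IsBest [digitsum n] 1 (digitsum n) := by
    refine ⟨?_, by simp, by simp, ?_⟩
    · intro v hv; simp at hv; subst hv; simp
    · intro v hv _; simp at hv; exact le_of_eq hv
  obtain ⟨c', hA⟩ := aLoop_best (n.toNat + 1) n [digitsum n] 1 (digitsum n) base
  set srt := PySem.List.sorted seq (fun v => v) with hsrt
  have hperm : srt.Perm seq := PySem.List.sorted_perm seq (fun v => v) false
  have hpw : srt.Pairwise (· ≤ ·) := PySem.List.sorted_pairwise seq (fun v => v)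
  have hnil : srt ≠ [] := by
    intro h
    have h2 := hperm.length_eq
    rw [h] at h2
    simp [hseq] at h2
  obtain ⟨l, bl, bv, hfold, _, _, hB⟩ := bScan_inv srt hnil hpw
  have hBseq : IsBest seq bl bv := isBest_perm srt seq bl bv hperm hB
  rw [hfold]
  exact isBest_unique seq c' _ bl bv hA hBseq
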